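-- pv_equiv track=rewrite | github.com/shipiit/shipit_agent | shipit_agent/autopilot/fanout.py | _rollup_status
-- ===== SOURCE A (Python) =====
-- def _rollup_status(statuses: list[str]) -> str:
--     if not statuses:
--         return "completed"
--     if all(s == "completed" for s in statuses):
--         return "completed"
--     if all(s == "failed" for s in statuses):
--         return "failed"
--     return "partial"
-- ===== SOURCE B (Python) =====
-- def _rollup_status(statuses: list[str]) -> str:
--     # single left fold: normalize each status to completed/failed/partial and
--     # merge into an accumulator where 'partial' is absorbing
--     summary = "completed"
--     first = True
--     for s in statuses:
--         cur = s if s in ("completed", "failed") else "partial"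
--         if first:
--             summary = cur
--             first = False
--         elif summary != cur:
--             summary = "partial"
--     return summary
-- ===== Notes on version B (the rewrite author's own statement) =====
-- stated objective: alternative
-- what changed: Replaces the staged short-circuiting all() scans with a single left fold that normalizes each status to completed/failed/partial and merges it into an accumulator with 'partial' absorbing.
import Mathlib
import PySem

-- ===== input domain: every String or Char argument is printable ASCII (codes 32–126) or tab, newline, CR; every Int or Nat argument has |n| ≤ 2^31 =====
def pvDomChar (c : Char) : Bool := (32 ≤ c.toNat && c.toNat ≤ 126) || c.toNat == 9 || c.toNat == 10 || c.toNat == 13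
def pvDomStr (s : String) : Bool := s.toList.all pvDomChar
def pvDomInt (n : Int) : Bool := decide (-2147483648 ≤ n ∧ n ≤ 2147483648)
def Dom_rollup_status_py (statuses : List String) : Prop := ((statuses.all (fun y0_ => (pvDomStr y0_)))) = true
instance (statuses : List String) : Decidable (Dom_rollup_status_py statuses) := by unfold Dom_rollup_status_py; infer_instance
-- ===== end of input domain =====

-- B replaces A's staged all() scans with one left fold that normalizes each status
-- and merges it into an accumulator with "partial" absorbing (objective: alternative; same cost).

-- ===== PORT A =====
def rollup_status_py (statuses : List String) : String :=
  if statuses = [] then "completed"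
  else if statuses.all (fun s => s == "completed") then "completed"
  else if statuses.all (fun s => s == "failed") then "failed"
  else "partial"

-- ===== PORT B =====
def pvNorm (s : String) : String := if s == "completed" || s == "failed" then s else "partial"
def pvMerge (a b : String) : String := if a == b then a else "partial"
def pvStep (st : String × Bool) (s : String) : String × Bool :=
  let cur := pvNorm s
  (if st.2 then cur else pvMerge st.1 cur, false)
def rollup_status_py_alt (statuses : List String) : String :=
  (statuses.foldl pvStep ("completed", true)).1

-- ===== PRECONDITION & SPEC =====
def Spec_rollup_status_py (statuses : List String) (out : String) : Prop := out = rollup_status_py_alt statuses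
instance (statuses : List String) (out : String) : Decidable (Spec_rollup_status_py statuses out) := by unfold Spec_rollup_status_py; infer_instance

-- ===== CLAIM (what is proved, stated in full; the proofs are below) =====
def Claim_equal_rollup_status_py : Prop := ∀ (statuses : List String), Dom_rollup_status_py statuses → Spec_rollup_status_py statuses (rollup_status_py statuses)

-- ===== LEMMAS AND PROOFS =====

lemma pv_fold_false (a : String) (xs : List String) :
    xs.foldl pvStep (a, false) = (xs.foldl (fun acc s => pvMerge acc (pvNorm s)) a, false) := by
  induction xs generalizing a with
  | nil => rfl
  | cons s rest ih => simp [List.foldl, pvStep, ih]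

lemma pv_merge_partial (b : String) : pvMerge "partial" b = "partial" := by
  unfold pvMerge; split <;> rfl

lemma pv_fold_partial (xs : List String) :
    xs.foldl (fun acc s => pvMerge acc (pvNorm s)) "partial" = "partial" := by
  induction xs with
  | nil => rfl
  | cons s rest ih => simpa [List.foldl, pv_merge_partial] using ih

lemma pv_fold_char (a : String) (xs : List String) :
    xs.foldl (fun acc s => pvMerge acc (pvNorm s)) a =
      if xs.all (fun s => pvNorm s == a) then a else "partial" := by
  induction xs generalizing a with
  | nil => rfl
  | cons s rest ih =>
    simp only [List.foldl_cons, List.all_cons]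
    by_cases h : pvNorm s = a
    · have hm : pvMerge a (pvNorm s) = a := by simp [pvMerge, h]
      rw [hm, ih]; simp [h]
    · have hm : pvMerge a (pvNorm s) = "partial" := by simp [pvMerge, Ne.symm h]
      rw [hm, pv_fold_partial]
      simp [h]

lemma pv_norm_eq_completed (t : String) :
    ((if t = "completed" ∨ t = "failed" then t else "partial") = "completed") ↔ (t = "completed") := by
  by_cases h1 : t = "completed"
  · simp [h1]
  · by_cases h2 : t = "failed" <;> simp [h1, h2]

lemma pv_norm_eq_failed (t : String) :
    ((if t = "completed" ∨ t = "failed" then t else "partial") = "failed") ↔ (t = "failed") := by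
  by_cases h1 : t = "failed"
  · simp [h1]
  · by_cases h2 : t = "completed" <;> simp [h1, h2]

-- ===== VERDICT (by name: the statement is the Claim_ definition above) =====
theorem rollup_status_py_spec : Claim_equal_rollup_status_py := by
  intro statuses _
  unfold Spec_rollup_status_py rollup_status_py rollup_status_py_alt
  cases statuses with
  | nil => rfl
  | cons s rest =>
    have hstep : pvStep ("completed", true) s = (pvNorm s, false) := rfl
    simp only [List.foldl, hstep, pv_fold_false, pv_fold_char]
    by_cases hc : s = "completed"
    · subst hc
      simp [pvNorm, pv_norm_eq_completed]
    · by_cases hf : s = "failed"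
      · subst hf
        simp [pvNorm, pv_norm_eq_failed]
      · have hn : pvNorm s = "partial" := by simp [pvNorm, hc, hf]
        simp [hn, hc, hf]
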